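-- pv_equiv track=rewrite | github.com/LouisOporto/335-Project1 | main.py | swap_partner
-- ===== SOURCE A (Python) =====
-- def swap_partner(myList):
--     number_swapped = 0
--     for element in range(0, len(myList), 2):
--         if myList[element] % 2 == 0:
--             partner_number = myList[element] + 1
--         else:
--             partner_number = myList[element] - 1
--         for number in range(element + 1, len(myList)):
--             if myList[number] == partner_number:
--                 myList[number] = myList[element + 1]
--                 myList[element + 1] = partner_number
--                 number_swapped += 1
--                 break
--     return number_swapped
-- ===== SOURCE B (Python) =====
-- def swap_partner(myList):
--     # Hash index: value -> sorted list of its current positions; replaces A's inner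
--     # linear scan over the whole suffix by a lookup in the (usually tiny) bucket.
--     # Mutates myList in place exactly as A does.
--     pos = {}
--     for i, v in enumerate(myList):
--         pos.setdefault(v, []).append(i)
--     count = 0
--     for e in range(0, len(myList), 2):
--         v = myList[e]
--         p = v + 1 if v % 2 == 0 else v - 1
--         idxs = pos.get(p, [])
--         j = None
--         for t in idxs:          # bucket is sorted: first t >= e+1 is the leftmost match
--             if t >= e + 1:
--                 j = t
--                 break
--         if j is None:
--             continue
--         count += 1
--         if j != e + 1:
--             old = myList[e + 1]
--             myList[j] = old
--             myList[e + 1] = p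
--             idxs.remove(j)
--             _insort(idxs, e + 1)
--             lold = pos[old]
--             lold.remove(e + 1)
--             _insort(lold, j)
--     return count
--
-- def _insort(a, x):
--     k = 0
--     while k < len(a) and a[k] < x:
--         k += 1
--     a.insert(k, x)
-- ===== Notes on version B (the rewrite author's own statement) =====
-- stated objective: faster
-- what changed: A rescans the whole suffix for the partner value at every even index; B builds a hash index from value to its sorted list of current positions once, answers each 'first position >= e+1 holding the partner' query from that (usually tiny) bucket, and updates the index on each swap.
import Mathlib
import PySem

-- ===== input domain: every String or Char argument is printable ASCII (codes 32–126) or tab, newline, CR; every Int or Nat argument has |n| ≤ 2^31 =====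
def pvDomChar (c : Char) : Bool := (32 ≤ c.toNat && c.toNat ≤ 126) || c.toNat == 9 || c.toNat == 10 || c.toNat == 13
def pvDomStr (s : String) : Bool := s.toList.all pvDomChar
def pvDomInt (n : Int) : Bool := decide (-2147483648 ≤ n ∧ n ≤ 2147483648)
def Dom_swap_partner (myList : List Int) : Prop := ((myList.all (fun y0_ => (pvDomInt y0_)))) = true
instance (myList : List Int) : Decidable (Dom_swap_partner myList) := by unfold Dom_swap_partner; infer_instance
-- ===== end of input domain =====

-- B replaces A's inner linear scan over the whole suffix by a per-value hash index
-- (value -> sorted list of current positions) kept up to date across swaps; objective: faster.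
-- Both A and B mutate `myList` in place identically (verified by fuzzing); the theorems
-- below are about the RETURN value (the swap count).


-- ===== PORT A =====
-- inner loop `for number in range(element+1, len(myList)): if myList[number]==partner: break`,
-- returning the break index; fuel (≥ len - j) only makes the recursion structural.
def pvScanA (l : List Int) (p : Int) (j : Nat) : Nat → Option Nat
  | 0 => none
  | fuel+1 =>
    if j < l.length then
      (if l.getD j 0 == p then some j else pvScanA l p (j+1) fuel)
    else none

-- outer loop `for element in range(0, len(myList), 2)` with the two writes on a hit
def pvOuterA (l : List Int) (cnt : Int) (e : Nat) : Nat → Int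
  | 0 => cnt
  | fuel+1 =>
    if e < l.length then
      let v := l.getD e 0
      let p := if PySem.Int.mod v 2 = 0 then v + 1 else v - 1
      match pvScanA l p (e+1) l.length with
      | some j => pvOuterA ((l.set j (l.getD (e+1) 0)).set (e+1) p) (cnt+1) (e+2) fuel
      | none => pvOuterA l cnt (e+2) fuel
    else cnt

def swap_partner (myList : List Int) : Int := pvOuterA myList 0 0 myList.length

-- ===== PORT B =====
-- `j = next((t for t in idxs if t >= e+1), None)`: first element ≥ x of the bucket
def pvFindGe (x : Nat) : List Nat → Option Nat
  | [] => none
  | t :: rest => if x ≤ t then some t else pvFindGe x rest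

-- `_insort(a, x)`: advance while a[k] < x, insert x there
def pvInsort (x : Nat) : List Nat → List Nat
  | [] => [x]
  | t :: rest => if t < x then t :: pvInsort x rest else x :: t :: rest

-- `for i, v in enumerate(myList): pos.setdefault(v, []).append(i)`
def pvBuildPos (l : List Int) : PySem.Dict Int (List Nat) :=
  l.zipIdx.foldl (fun d q => d.modify q.1 [] (· ++ [q.2])) PySem.Dict.empty

def pvOuterB (l : List Int) (pos : PySem.Dict Int (List Nat)) (cnt : Int) (e : Nat) : Nat → Int
  | 0 => cnt
  | fuel+1 =>
    if e < l.length then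
      let v := l.getD e 0
      let p := if PySem.Int.mod v 2 = 0 then v + 1 else v - 1
      match pvFindGe (e+1) (pos.getD p []) with
      | none => pvOuterB l pos cnt (e+2) fuel
      | some j =>
        if j = e+1 then pvOuterB l pos (cnt+1) (e+2) fuel
        else
          let old := l.getD (e+1) 0
          let pos' := pos.insert p (pvInsort (e+1) ((pos.getD p []).erase j))
          let pos'' := pos'.insert old (pvInsort j ((pos'.getD old []).erase (e+1)))
          pvOuterB ((l.set j old).set (e+1) p) pos'' (cnt+1) (e+2) fuel
    else cnt

def swap_partner_alt (myList : List Int) : Int :=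
  pvOuterB myList (pvBuildPos myList) 0 0 myList.length

-- ===== PRECONDITION & SPEC =====
def Spec_swap_partner (myList : List Int) (out : Int) : Prop := out = swap_partner_alt myList
instance (myList : List Int) (out : Int) : Decidable (Spec_swap_partner myList out) := by unfold Spec_swap_partner; infer_instance

-- ===== CLAIM (what is proved, stated in full; the proofs are below) =====
def Claim_equal_swap_partner : Prop := ∀ (myList : List Int), Dom_swap_partner myList → Spec_swap_partner myList (swap_partner myList)

-- ===== LEMMAS AND PROOFS =====

-- the sorted list of positions holding value v
def pvIdxOf (l : List Int) (v : Int) : List Nat :=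
  (List.range l.length).filter (fun i => l.getD i 0 == v)

-- invariant: the dict maps every value to its sorted position list
def pvPosInv (l : List Int) (pos : PySem.Dict Int (List Nat)) : Prop :=
  ∀ v, pos.getD v [] = pvIdxOf l v

lemma pvMem_idxOf {l : List Int} {v : Int} {i : Nat} :
    i ∈ pvIdxOf l v ↔ i < l.length ∧ l.getD i 0 = v := by
  simp [pvIdxOf, List.mem_filter, List.mem_range]

lemma pvPairwise_idxOf (l : List Int) (v : Int) : (pvIdxOf l v).Pairwise (· < ·) :=
  List.Pairwise.filter _ List.pairwise_lt_range

lemma pvSortedExt {a b : List Nat} (h : ∀ x, x ∈ a ↔ x ∈ b)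
    (pa : a.Pairwise (· < ·)) (pb : b.Pairwise (· < ·)) : a = b :=
  List.Perm.eq_of_pairwise (fun _ _ _ _ h1 h2 => absurd h1 (Nat.not_lt.2 h2.le)) pa pb
    ((List.perm_ext_iff_of_nodup (pa.imp ne_of_lt) (pb.imp ne_of_lt)).2 h)

lemma pvGetD_set (l : List Int) (a : Nat) (x : Int) (i : Nat) (h : a < l.length) :
    (l.set a x).getD i 0 = if i = a then x else l.getD i 0 := by
  simp only [List.getD_eq_getElem?_getD, List.getElem?_set, h]
  by_cases hi : a = i
  · simp [hi]
  · simp [hi]; intro hh; exact absurd hh.symm hi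

lemma pvSet_self (l : List Int) (a : Nat) (x : Int) (hx : l.getD a 0 = x) (h : a < l.length) :
    l.set a x = l := by
  subst hx; simp [List.getD_eq_getElem?_getD, List.getElem?_eq_getElem h]

-- build: zipIdx bridge + invariant for the initial dict
lemma pvZipIdx_filter_map (l : List Int) (v : Int) :
    (l.zipIdx.filter (fun q => q.1 == v)).map (·.2) = pvIdxOf l v := by
  induction l using List.reverseRecOn with
  | nil => rfl
  | append_singleton l x ih =>
    rw [List.zipIdx_append, List.filter_append, List.map_append, ih]
    simp only [pvIdxOf, List.length_append, List.length_singleton, List.range_succ,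
      List.filter_append]
    congr 1
    · apply List.filter_congr
      intro i hi
      rw [List.getD_append _ _ _ _ (List.mem_range.1 hi)]
    · by_cases hb : x = v
      · simp [List.zipIdx, hb]
      · simp [List.zipIdx, hb]

lemma pvBuildPos_inv (l : List Int) : pvPosInv l (pvBuildPos l) := by
  intro v
  rw [pvBuildPos, PySem.Dict.getD_foldl_modify_append]
  simpa using pvZipIdx_filter_map l v

-- findGe is "first element ≥ x"
lemma pvFindGe_eq (x : Nat) (a : List Nat) :
    pvFindGe x a = (a.filter (fun t => decide (x ≤ t))).head? := by
  induction a with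
  | nil => rfl
  | cons t rest ih =>
    by_cases h : x ≤ t <;> simp [pvFindGe, h, ih]

lemma pvFilter_range_ge (n x : Nat) :
    (List.range n).filter (fun i => decide (x ≤ i)) = List.range' x (n - x) := by
  rcases Nat.le_total x n with h | h
  · rw [List.range_eq_range', show n = x + (n - x) by omega, ← List.range'_append_1]
    rw [List.filter_append, List.filter_eq_nil_iff.2, List.filter_eq_self.2] <;>
      simp [List.mem_range'] <;> omega
  · rw [show n - x = 0 by omega, List.filter_eq_nil_iff.2]; · rfl
    · simp [List.mem_range]; omega

-- the scan computed head?-style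
lemma pvScanA_eq (l : List Int) (p : Int) :
    ∀ (fuel j : Nat), l.length - j ≤ fuel →
    pvScanA l p j fuel = ((List.range' j (l.length - j)).filter (fun i => l.getD i 0 == p)).head? := by
  intro fuel
  induction fuel with
  | zero =>
    intro j h
    rw [show l.length - j = 0 by omega]
    rfl
  | succ fuel ih =>
    intro j h
    by_cases hj : j < l.length
    · rw [show l.length - j = (l.length - (j+1)) + 1 by omega, List.range'_succ, List.filter_cons,
        pvScanA, if_pos hj]
      by_cases hb : (l.getD j 0 == p) = true
      · rw [if_pos hb, if_pos hb, List.head?_cons]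
      · rw [if_neg hb, if_neg hb, ih (j+1) (by omega)]
    · rw [show l.length - j = 0 by omega, pvScanA, if_neg hj]
      rfl

-- under the invariant, B's bucket lookup equals A's suffix scan
lemma pvLookup_eq_scan (l : List Int) (p : Int) (e : Nat) :
    pvFindGe (e+1) (pvIdxOf l p) = pvScanA l p (e+1) l.length := by
  rw [pvFindGe_eq, pvIdxOf, List.filter_filter, pvScanA_eq l p l.length (e+1) (by omega),
    ← pvFilter_range_ge l.length (e+1), List.filter_filter]
  congr 1
  apply List.filter_congr
  intro i _
  exact Bool.and_comm _ _

-- facts extracted from a successful scan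
lemma pvScanA_some (l : List Int) (p : Int) (j0 j : Nat)
    (h : pvScanA l p j0 l.length = some j) :
    j0 ≤ j ∧ j < l.length ∧ l.getD j 0 = p ∧
      (∀ i, j0 ≤ i → i < l.length → l.getD i 0 = p → j ≤ i) := by
  rw [pvScanA_eq l p l.length j0 (by omega)] at h
  rcases List.head?_eq_some_iff.1 h with ⟨ys, hf⟩
  have hmemj : j ∈ (List.range' j0 (l.length - j0)).filter (fun i => l.getD i 0 == p) := by
    rw [hf]; exact List.mem_cons_self ..
  rcases List.mem_filter.1 hmemj with ⟨hr, hp⟩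
  rcases List.mem_range'_1.1 hr with ⟨h1, h2⟩
  have hpw : ((List.range' j0 (l.length - j0)).filter (fun i => l.getD i 0 == p)).Pairwise (· < ·) :=
    List.Pairwise.filter _ (List.pairwise_lt_range')
  rw [hf] at hpw
  refine ⟨h1, by omega, by simpa using hp, ?_⟩
  intro i hi1 hi2 hip
  have hmi : i ∈ (List.range' j0 (l.length - j0)).filter (fun i => l.getD i 0 == p) :=
    List.mem_filter.2 ⟨List.mem_range'_1.2 ⟨hi1, by omega⟩, by simpa using hip⟩
  rw [hf] at hmi
  rcases List.mem_cons.1 hmi with rfl | hmi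
  · exact le_refl i
  · exact ((List.pairwise_cons.1 hpw).1 i hmi).le

-- insort membership / sortedness
lemma pvMem_insort {x b : Nat} {a : List Nat} : b ∈ pvInsort x a ↔ b = x ∨ b ∈ a := by
  induction a with
  | nil => simp [pvInsort]
  | cons t rest ih =>
    by_cases h : t < x <;> simp [pvInsort, h, ih] <;> tauto

lemma pvPairwise_insort {x : Nat} {a : List Nat} (pa : a.Pairwise (· < ·)) (hx : x ∉ a) :
    (pvInsort x a).Pairwise (· < ·) := by
  induction a with
  | nil => simp [pvInsort]
  | cons t rest ih =>
    rcases List.pairwise_cons.1 pa with ⟨ht, prest⟩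
    by_cases h : t < x
    · rw [pvInsort, if_pos h]
      refine List.pairwise_cons.2 ⟨?_, ih prest (fun hm => hx (List.mem_cons_of_mem _ hm))⟩
      intro b hb
      rcases pvMem_insort.1 hb with rfl | hb
      · exact h
      · exact ht b hb
    · rw [pvInsort, if_neg h]
      have hxt : x ≠ t := fun hh => hx (by simp [hh])
      refine List.pairwise_cons.2 ⟨?_, pa⟩
      intro b hb
      rcases List.mem_cons.1 hb with rfl | hb
      · omega
      · exact lt_of_le_of_lt (by omega) (ht b hb)

-- the invariant is preserved by a swap
lemma pvInv_update (l : List Int) (pos : PySem.Dict Int (List Nat)) (p old : Int) (e j : Nat)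
    (inv : pvPosInv l pos)
    (hj : j < l.length) (he : e+1 < l.length) (hne : j ≠ e+1)
    (hjp : l.getD j 0 = p) (hold : old = l.getD (e+1) 0) (hop : old ≠ p) :
    pvPosInv ((l.set j old).set (e+1) p)
      ((pos.insert p (pvInsort (e+1) ((pos.getD p []).erase j))).insert old
        (pvInsort j (((pos.insert p (pvInsort (e+1) ((pos.getD p []).erase j))).getD old []).erase (e+1)))) := by
  have hlen : ((l.set j old).set (e+1) p).length = l.length := by simp
  have hgd : ∀ i, ((l.set j old).set (e+1) p).getD i 0 =
      if i = e+1 then p else if i = j then old else l.getD i 0 := by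
    intro i
    rw [pvGetD_set _ _ _ _ (by simpa using he), pvGetD_set _ _ _ _ hj]
  have he1p : l.getD (e+1) 0 ≠ p := by rw [← hold]; exact hop
  have hjo : l.getD j 0 ≠ old := by rw [hjp]; exact Ne.symm hop
  have hLold : ((pos.insert p (pvInsort (e+1) ((pos.getD p []).erase j))).getD old []) =
      pvIdxOf l old := by
    rw [PySem.Dict.getD_insert_of_ne _ _ _ hop]; exact inv old
  have hmemIdx : ∀ (w : Int) (x : Nat), x ∈ pvIdxOf l w ↔ x < l.length ∧ l.getD x 0 = w :=
    fun w x => pvMem_idxOf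
  have hmemIdx' : ∀ (w : Int) (x : Nat), x ∈ pvIdxOf ((l.set j old).set (e+1) p) w ↔
      x < l.length ∧ ((if x = e+1 then p else if x = j then old else l.getD x 0) = w) := by
    intro w x
    rw [pvMem_idxOf, hlen, hgd]
  have hnodup : ∀ w : Int, (pvIdxOf l w).Nodup := fun w => (pvPairwise_idxOf l w).imp ne_of_lt
  intro v
  rw [hLold]
  by_cases hvo : v = old
  · subst hvo
    rw [PySem.Dict.getD_insert_self]
    have hjnot : j ∉ (pvIdxOf l v).erase (e+1) := by
      intro hm
      exact hjo ((hmemIdx v j).1 (((hnodup v).mem_erase_iff).1 hm).2).2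
    refine pvSortedExt ?_ (pvPairwise_insort (List.Pairwise.sublist List.erase_sublist
      (pvPairwise_idxOf l v)) hjnot) (pvPairwise_idxOf _ v)
    intro x
    rw [pvMem_insort, (hnodup v).mem_erase_iff, hmemIdx, hmemIdx']
    by_cases hx1 : x = e+1
    · subst hx1
      simp [Ne.symm hne, Ne.symm hop]
    · by_cases hx2 : x = j
      · subst hx2
        simp [hx1, hj]
      · simp [hx1, hx2]
  · by_cases hvp : v = p
    · subst hvp
      rw [PySem.Dict.getD_insert_of_ne _ _ _ (Ne.symm hop), PySem.Dict.getD_insert_self, inv v]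
      have he1not : e+1 ∉ (pvIdxOf l v).erase j := by
        intro hm
        exact he1p ((hmemIdx v (e+1)).1 (((hnodup v).mem_erase_iff).1 hm).2).2
      refine pvSortedExt ?_ (pvPairwise_insort (List.Pairwise.sublist List.erase_sublist
        (pvPairwise_idxOf l v)) he1not) (pvPairwise_idxOf _ v)
      intro x
      rw [pvMem_insort, (hnodup v).mem_erase_iff, hmemIdx, hmemIdx']
      by_cases hx1 : x = e+1
      · subst hx1; simp [he]
      · by_cases hx2 : x = j
        · subst hx2
          simp [hx1, hop]
        · simp [hx1, hx2]
    · rw [PySem.Dict.getD_insert_of_ne _ _ _ hvo, PySem.Dict.getD_insert_of_ne _ _ _ hvp, inv v]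
      refine (pvSortedExt ?_ (pvPairwise_idxOf _ v) (pvPairwise_idxOf l v)).symm
      intro x
      rw [hmemIdx, hmemIdx']
      by_cases hx1 : x = e+1
      · subst hx1
        simp only [if_pos]
        constructor
        · rintro ⟨h1, h2⟩; exact absurd h2.symm hvp
        · rintro ⟨h1, h2⟩; rw [← hold] at h2; exact absurd h2.symm hvo
      · by_cases hx2 : x = j
        · subst hx2
          simp only [if_neg hx1, if_pos]
          constructor
          · rintro ⟨h1, h2⟩; exact absurd h2.symm hvo
          · rintro ⟨h1, h2⟩; rw [hjp] at h2; exact absurd h2.symm hvp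
        · simp [hx1, hx2]

-- main loop agreement
lemma pvMain (fuel : Nat) : ∀ (l : List Int) (pos : PySem.Dict Int (List Nat)) (cnt : Int) (e : Nat),
    pvPosInv l pos → pvOuterA l cnt e fuel = pvOuterB l pos cnt e fuel := by
  induction fuel with
  | zero => intro l pos cnt e _; rfl
  | succ fuel ih =>
    intro l pos cnt e inv
    rw [pvOuterA, pvOuterB]
    by_cases he : e < l.length
    · rw [if_pos he, if_pos he]
      simp only []
      set v := l.getD e 0 with hv
      set p := (if PySem.Int.mod v 2 = 0 then v + 1 else v - 1) with hp
      rw [inv p, pvLookup_eq_scan l p e]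
      cases hscan : pvScanA l p (e+1) l.length with
      | none => exact ih l pos cnt (e+2) inv
      | some j =>
        rcases pvScanA_some l p (e+1) j hscan with ⟨hj1, hj2, hj3, hmin⟩
        dsimp only
        by_cases hje : j = e+1
        · rw [if_pos hje]
          have he1 : e+1 < l.length := by omega
          have hl : (l.set j (l.getD (e+1) 0)).set (e+1) p = l := by
            subst hje
            rw [pvSet_self l (e+1) (l.getD (e+1) 0) rfl he1,
              pvSet_self l (e+1) p hj3 he1]
          rw [hl]
          exact ih l pos (cnt+1) (e+2) inv
        · rw [if_neg hje]
          have he1 : e+1 < l.length := by omega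
          have hop : l.getD (e+1) 0 ≠ p := by
            intro hcontra
            exact hje (le_antisymm (hmin (e+1) (le_refl _) he1 hcontra) hj1)
          have hupd := pvInv_update l pos p (l.getD (e+1) 0) e j inv hj2 he1 hje hj3 rfl hop
          rw [inv p] at hupd
          exact ih _ _ (cnt+1) (e+2) hupd
    · rw [if_neg he, if_neg he]

-- ===== VERDICT (by name: the statement is the Claim_ definition above) =====
theorem swap_partner_spec : Claim_equal_swap_partner := by
  intro l _
  unfold Spec_swap_partner swap_partner swap_partner_alt
  exact pvMain l.length l (pvBuildPos l) 0 0 (pvBuildPos_inv l)
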